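-- pv_equiv track=rewrite | github.com/ShumovAleksej/todoproject | tables_image.py | use_name
-- ===== SOURCE A (Python) =====
-- def use_name(name, chet):
--     r = ''
--     for i in name:
--         if chet == 0:
--             break
--         if i in '\/:*?"<>|':
--             continue
--         r += i
--         chet -= 1
--     return r
-- ===== SOURCE B (Python) =====
-- _FORBIDDEN = set('\/:*?"<>|')
--
-- def use_name(name, chet):
--     filtered = ''.join(c for c in name if c not in _FORBIDDEN)
--     return filtered[:chet] if chet >= 0 else filtered
-- ===== Notes on version B (the rewrite author's own statement) =====
-- stated objective: simpler
-- what changed: Replaces A's single budget-counting loop with break/continue by two separate phases: a filtering comprehension over the whole string, then a slice for the truncation (applied only when chet >= 0, since Python's loop never stops for negative chet).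
import Mathlib
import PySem

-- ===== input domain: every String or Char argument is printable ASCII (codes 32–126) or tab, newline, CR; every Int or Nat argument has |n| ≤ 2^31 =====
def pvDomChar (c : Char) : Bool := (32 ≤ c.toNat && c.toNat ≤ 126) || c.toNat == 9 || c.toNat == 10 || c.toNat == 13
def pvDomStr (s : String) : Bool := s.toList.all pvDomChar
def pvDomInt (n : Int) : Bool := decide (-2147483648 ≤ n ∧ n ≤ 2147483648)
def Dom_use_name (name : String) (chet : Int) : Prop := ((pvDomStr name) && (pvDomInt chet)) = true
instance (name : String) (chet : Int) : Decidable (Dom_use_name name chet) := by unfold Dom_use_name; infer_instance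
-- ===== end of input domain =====

-- B separates A's single budget-counting loop into a filter pass plus a slice (only when chet ≥ 0): simpler decomposition, same cost.

-- ===== PORT A =====
-- the forbidden characters '\/:*?"<>|' (Python's '\/' is backslash then slash)
def pvForbidden (c : Char) : Bool := ['\\', '/', ':', '*', '?', '"', '<', '>', '|'].contains c

-- A's loop: r accumulates kept chars, chet counts down, breaks when chet hits 0
def use_name_loop : List Char → List Char → Int → List Char
  | [], r, _ => r
  | c :: cs, r, chet =>
    if chet = 0 then r
    else if pvForbidden c then use_name_loop cs r chet
    else use_name_loop cs (r ++ [c]) (chet - 1)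

def use_name (name : String) (chet : Int) : String :=
  String.ofList (use_name_loop name.toList [] chet)

-- ===== PORT B =====
def use_name_alt (name : String) (chet : Int) : String :=
  let filtered := name.toList.filter (fun c => !pvForbidden c)
  String.ofList (if 0 ≤ chet then filtered.take chet.toNat else filtered)

-- ===== PRECONDITION & SPEC =====
def Spec_use_name (name : String) (chet : Int) (out : String) : Prop := out = use_name_alt name chet
instance (name : String) (chet : Int) (out : String) : Decidable (Spec_use_name name chet out) := by unfold Spec_use_name; infer_instance

-- ===== CLAIM (what is proved, stated in full; the proofs are below) =====
def Claim_equal_use_name : Prop := ∀ (name : String) (chet : Int), Dom_use_name name chet → Spec_use_name name chet (use_name name chet)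

-- ===== LEMMAS AND PROOFS =====
theorem use_name_loop_eq (cs : List Char) : ∀ (r : List Char) (chet : Int),
    use_name_loop cs r chet =
      r ++ (if 0 ≤ chet then (cs.filter (fun c => !pvForbidden c)).take chet.toNat
            else cs.filter (fun c => !pvForbidden c)) := by
  induction cs with
  | nil => intro r chet; simp [use_name_loop]
  | cons c cs ih =>
    intro r chet
    by_cases h0 : chet = 0
    · subst h0; simp [use_name_loop]
    · by_cases hf : pvForbidden c
      · simp [use_name_loop, h0, hf, ih]
      · simp only [use_name_loop, if_neg h0, if_neg hf]
        rw [ih, List.filter_cons]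
        rcases lt_trichotomy chet 0 with hlt | hz | hgt
        · rw [if_neg (by omega : ¬ (0:Int) ≤ chet - 1), if_neg (by omega : ¬ (0:Int) ≤ chet)]
          simp [hf]
        · exact absurd hz h0
        · rw [if_pos (by omega : (0:Int) ≤ chet - 1), if_pos (by omega : (0:Int) ≤ chet)]
          have ht : chet.toNat = (chet - 1).toNat + 1 := by omega
          simp only [hf, Bool.not_false, if_true, ht, List.take_succ_cons]
          simp

-- ===== VERDICT (by name: the statement is the Claim_ definition above) =====
theorem use_name_spec : Claim_equal_use_name := by
  intro name chet _
  unfold Spec_use_name use_name use_name_alt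
  rw [use_name_loop_eq]
  simp
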